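-- pv_equiv track=rewrite | github.com/kkr010128/codebert | problem285/problem285_135.py | leftmore
-- ===== SOURCE A (Python) =====
-- def leftmore(ln):
--     ret = [0]
--     cur = 0
--     for c in ln:
--         if c == "<":
--             cur += 1
--         else:
--             cur = 0
--
--         ret.append(cur)
--     return ret
-- ===== SOURCE B (Python) =====
-- def leftmore(ln):
--     ret = [0]
--     i = 0
--     n = len(ln)
--     while i < n:
--         j = i
--         while j < n and ln[j] == ln[i]:
--             j += 1
--         run = j - i
--         if ln[i] == "<":
--             ret.extend(range(1, run + 1))
--         else:
--             ret.extend([0] * run)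
--         i = j
--     return ret
-- ===== Notes on version B (the rewrite author's own statement) =====
-- stated objective: alternative
-- what changed: B scans maximal runs of identical characters and emits each run's contribution at once (1..n for a '<' run, n zeros otherwise) instead of maintaining a per-character counter.
import Mathlib
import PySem

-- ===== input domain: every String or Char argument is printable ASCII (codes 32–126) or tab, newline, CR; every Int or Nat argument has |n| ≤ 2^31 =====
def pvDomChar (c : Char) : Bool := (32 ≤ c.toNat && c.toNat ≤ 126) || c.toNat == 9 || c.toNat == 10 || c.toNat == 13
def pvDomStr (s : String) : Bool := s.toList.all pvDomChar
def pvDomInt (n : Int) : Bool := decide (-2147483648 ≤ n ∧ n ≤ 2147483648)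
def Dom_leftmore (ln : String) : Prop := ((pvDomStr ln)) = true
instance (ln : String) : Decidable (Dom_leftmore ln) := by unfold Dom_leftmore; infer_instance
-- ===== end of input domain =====

-- B replaces A's per-character counter with a run-length scan: each maximal run of
-- identical characters contributes 1..n (a '<' run) or n zeros at once ("alternative").

-- ===== PORT A =====
-- per-character loop: cur counts the current streak of '<', appended after each char
def leftmore (ln : String) : List Int :=
  (ln.toList.foldl
    (fun (s : List Int × Int) c =>
      let cur : Int := if c == '<' then s.2 + 1 else 0
      (s.1 ++ [cur], cur))
    ([0], 0)).1

-- ===== PORT B =====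
-- run-length scan: split off the maximal run of the head character, emit its block
def leftmoreRuns (l : List Char) : List Int :=
  match l with
  | [] => []
  | c :: rest =>
    let n := (rest.takeWhile (· == c)).length + 1
    (if c == '<' then (List.range n).map (fun (k : Nat) => (k : Int) + 1)
     else List.replicate n 0) ++ leftmoreRuns (rest.dropWhile (· == c))
termination_by l.length
decreasing_by
  simp only [List.length_cons]
  exact Nat.lt_succ_of_le (List.length_dropWhile_le _ _)

def leftmore_alt (ln : String) : List Int := 0 :: leftmoreRuns ln.toList

-- ===== PRECONDITION & SPEC =====
def Spec_leftmore (ln : String) (out : List Int) : Prop := out = leftmore_alt ln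
instance (ln : String) (out : List Int) : Decidable (Spec_leftmore ln out) := by unfold Spec_leftmore; infer_instance

-- ===== CLAIM (what is proved, stated in full; the proofs are below) =====
def Claim_equal_leftmore : Prop := ∀ (ln : String), Dom_leftmore ln → Spec_leftmore ln (leftmore ln)

-- ===== LEMMAS AND PROOFS =====

-- the list of running counts produced by A's loop, without the accumulator
def lmCounts (cur : Int) : List Char → List Int
  | [] => []
  | c :: t =>
    let cur' : Int := if c == '<' then cur + 1 else 0
    cur' :: lmCounts cur' t

theorem lm_foldl (l : List Char) : ∀ (acc : List Int) (cur : Int),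
    (l.foldl (fun (s : List Int × Int) c =>
      let cur : Int := if c == '<' then s.2 + 1 else 0
      (s.1 ++ [cur], cur)) (acc, cur)).1 = acc ++ lmCounts cur l := by
  induction l with
  | nil => intro acc cur; simp [lmCounts]
  | cons c t ih =>
    intro acc cur
    simp only [List.foldl_cons, lmCounts]
    rw [ih]
    simp

-- a non-'<' head resets the counter, so the start value is irrelevant
theorem lmCounts_reset (m : Int) (t : List Char) (h : ∀ c, t.head? = some c → c ≠ '<') :
    lmCounts m t = lmCounts 0 t := by
  cases t with
  | nil => rfl
  | cons c u =>
    have hc : c ≠ '<' := h c rfl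
    simp [lmCounts, hc]

-- a run of '<' of length n starting at count k contributes k+1 .. k+n
theorem lmCounts_lt_run (s : List Char) (hs : ∀ c ∈ s, c = '<') (t : List Char) (k : Int) :
    lmCounts k (s ++ t) = ((List.range s.length).map (fun (i : Nat) => k + (i : Int) + 1)) ++ lmCounts (k + s.length) t := by
  induction s generalizing k with
  | nil => simp
  | cons c u ih =>
    have hc : c = '<' := hs c (by simp)
    have ihu := ih (fun d hd => hs d (by simp [hd])) (k + 1)
    simp only [List.cons_append, lmCounts, hc, beq_self_eq_true, if_true]
    simp only [List.length_cons]
    rw [ihu, List.range_succ_eq_map, List.map_cons, List.map_map, List.cons_append]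
    congr 2
    · push_cast; ring
    · apply List.map_congr_left; intro i _; simp [Function.comp]; ring
    · congr 1; push_cast; ring

-- a run of non-'<' characters contributes zeros, starting and ending at count 0
theorem lmCounts_other_run (s : List Char) (hs : ∀ d ∈ s, d ≠ '<') (t : List Char) :
    lmCounts 0 (s ++ t) = List.replicate s.length 0 ++ lmCounts 0 t := by
  induction s with
  | nil => simp
  | cons d u ih =>
    have hd : d ≠ '<' := hs d (by simp)
    simp only [List.cons_append, lmCounts, List.length_cons, List.replicate_succ]
    simp [hd]
    exact ih (fun e he => hs e (by simp [he]))

-- the first character after a dropWhile fails the predicate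
theorem head_dropWhile_false {p : Char → Bool} (l : List Char) (c : Char)
    (h : (l.dropWhile p).head? = some c) : p c = false := by
  induction l with
  | nil => simp [List.dropWhile] at h
  | cons a t ih =>
    by_cases hp : p a
    · exact ih (by simpa [List.dropWhile, hp] using h)
    · simp [List.dropWhile, hp] at h
      subst h
      simpa using hp

theorem lmCounts_eq_runs (l : List Char) : lmCounts 0 l = leftmoreRuns l := by
  induction l using leftmoreRuns.induct with
  | case1 => simp [lmCounts, leftmoreRuns]
  | case2 c rest ih =>
    have htw : ∀ d ∈ rest.takeWhile (· == c), d = c := by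
      intro d hd
      have hb : (d == c) = true := List.mem_takeWhile_imp (p := (· == c)) hd
      exact eq_of_beq hb
    have hsplit : c :: rest = (c :: rest.takeWhile (· == c)) ++ rest.dropWhile (· == c) := by
      simp [List.takeWhile_append_dropWhile]
    by_cases hc : c = '<'
    · have hrun : ∀ d ∈ c :: rest.takeWhile (· == c), d = '<' := by
        intro d hd
        rcases List.mem_cons.mp hd with h | h
        · rw [h]; exact hc
        · rw [htw d h]; exact hc
      conv_lhs => rw [hsplit]
      rw [lmCounts_lt_run _ hrun]
      have hreset : lmCounts (0 + ((c :: rest.takeWhile (· == c)).length : Int)) (rest.dropWhile (· == c))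
          = lmCounts 0 (rest.dropWhile (· == c)) := by
        apply lmCounts_reset
        intro d hd
        have := head_dropWhile_false _ _ hd
        intro hlt
        rw [hlt, ← hc] at this
        simp at this
      rw [hreset, ih]
      conv_rhs => rw [leftmoreRuns]
      simp only [hc, beq_self_eq_true, if_true, List.length_cons]
      congr 1
      apply List.map_congr_left
      intro i _
      ring
    · have hrun : ∀ d ∈ c :: rest.takeWhile (· == c), d ≠ '<' := by
        intro d hd
        rcases List.mem_cons.mp hd with h | h
        · rw [h]; exact hc
        · rw [htw d h]; exact hc
      conv_lhs => rw [hsplit]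
      rw [lmCounts_other_run _ hrun, ih]
      conv_rhs => rw [leftmoreRuns]
      have hcb : (c == '<') = false := by simpa using hc
      simp [hcb]

theorem leftmore_spec : Claim_equal_leftmore := by
  intro ln _
  unfold Spec_leftmore leftmore leftmore_alt
  rw [lm_foldl]
  simp [lmCounts_eq_runs]
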